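-- pv_equiv track=rewrite | github.com/Rtoony/BR_LISP_DEV | tools/validate_repo.py | strip_lisp_comments_and_strings
-- ===== SOURCE A (Python) =====
-- def strip_lisp_comments_and_strings(line: str, in_string: bool) -> tuple[str, bool]:
--     result: list[str] = []
--     escaped = False
--     for ch in line:
--         if in_string:
--             if escaped:
--                 escaped = False
--             elif ch == "\\":
--                 escaped = True
--             elif ch == '"':
--                 in_string = False
--             result.append(" ")
--             continue
--
--         if ch == ";":
--             break
--         if ch == '"':
--             in_string = True
--             result.append(" ")
--             continue
--         result.append(ch)
--     return "".join(result), in_string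
-- ===== SOURCE B (Python) =====
-- def _string_span(line: str) -> tuple[int, bool]:
--     """Length of the in-string run from the start of `line` (closing quote
--     included) and whether a closing unescaped quote was found."""
--     i, n = 0, len(line)
--     while i < n:
--         c = line[i]
--         if c == '\\':
--             i += 2
--         elif c == '"':
--             return i + 1, True
--         else:
--             i += 1
--     return n, False
--
--
-- def strip_lisp_comments_and_strings(line: str, in_string: bool) -> tuple[str, bool]:
--     if in_string:
--         k, closed = _string_span(line)
--         if closed:
--             rest, flag = strip_lisp_comments_and_strings(line[k:], False)
--             return " " * k + rest, flag
--         return " " * k, True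
--     for idx, ch in enumerate(line):
--         if ch == ';':
--             return line[:idx], False
--         if ch == '"':
--             rest, flag = strip_lisp_comments_and_strings(line[idx + 1:], True)
--             return line[:idx] + " " + rest, flag
--     return line, False
-- ===== Notes on version B (the rewrite author's own statement) =====
-- stated objective: alternative
-- what changed: Replaces A's per-character state machine threading in_string/escaped flags by a segment scanner: a span helper consumes a whole string literal (skipping backslash-escaped pairs) and emits a run of spaces, and code chunks are copied up to the next '"' or ';' in one piece.
import Mathlib
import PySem

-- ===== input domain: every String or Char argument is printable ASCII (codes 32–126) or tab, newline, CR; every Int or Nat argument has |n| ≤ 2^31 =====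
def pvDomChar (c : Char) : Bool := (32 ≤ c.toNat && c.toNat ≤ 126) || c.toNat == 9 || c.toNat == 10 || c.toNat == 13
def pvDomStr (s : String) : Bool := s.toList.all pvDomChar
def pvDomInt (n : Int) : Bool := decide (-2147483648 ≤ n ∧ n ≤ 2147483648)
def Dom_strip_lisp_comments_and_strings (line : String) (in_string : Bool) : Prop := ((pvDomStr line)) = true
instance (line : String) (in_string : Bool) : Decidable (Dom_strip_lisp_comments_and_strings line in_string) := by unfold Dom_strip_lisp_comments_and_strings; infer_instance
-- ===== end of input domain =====

-- B replaces A's per-character in_string/escaped state machine by a segment scanner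
-- (span of the string run, then a code chunk up to the next '"' or ';'); objective: alternative decomposition, same cost.

-- ===== PORT A =====
-- the for-loop of A, with state (in_string, escaped); builds the result front-to-back
def pvAGo : List Char → Bool → Bool → List Char × Bool
  | [], ins, _ => ([], ins)
  | ch :: rest, ins, esc =>
    if ins then
      let st : Bool × Bool :=
        if esc then (ins, false)
        else if ch = '\\' then (ins, true)
        else if ch = '"' then (false, false)
        else (ins, false)
      let r := pvAGo rest st.1 st.2
      (' ' :: r.1, r.2)
    else if ch = ';' then ([], ins)        -- break
    else if ch = '"' then
      let r := pvAGo rest true esc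
      (' ' :: r.1, r.2)
    else
      let r := pvAGo rest ins esc
      (ch :: r.1, r.2)

def strip_lisp_comments_and_strings (line : String) (in_string : Bool) : String × Bool :=
  let r := pvAGo line.toList in_string false
  (String.mk r.1, r.2)

-- ===== PORT B =====
-- _string_span: chars consumed by the string run (closing quote included), and whether it closed
def pvSpan : List Char → Nat × Bool
  | [] => (0, false)
  | c :: rest =>
    if c = '\\' then
      match rest with
      | [] => (1, false)                   -- i += 2 runs past the end: whole line consumed
      | _ :: rest' => let r := pvSpan rest'; (r.1 + 2, r.2)
    else if c = '"' then (1, true)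
    else let r := pvSpan rest; (r.1 + 1, r.2)

-- the enumerate loop of B: length of the code chunk and the stopping char, if any
def pvCodeSpan : List Char → Nat × Option Char
  | [] => (0, none)
  | c :: rest =>
    if c = ';' ∨ c = '"' then (0, some c)
    else let r := pvCodeSpan rest; (r.1 + 1, r.2)

theorem pvSpan_pos (l : List Char) (h : (pvSpan l).2 = true) : 1 ≤ (pvSpan l).1 ∧ l ≠ [] := by
  cases l with
  | nil => simp [pvSpan] at h
  | cons c rest =>
    refine ⟨?_, by simp⟩
    cases rest <;> simp [pvSpan] <;> split_ifs <;> simp_all <;> omega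

def pvBGo (l : List Char) (ins : Bool) : List Char × Bool :=
  if ins then
    let s := pvSpan l
    if hs : s.2 then
      let r := pvBGo (l.drop s.1) false
      (List.replicate s.1 ' ' ++ r.1, r.2)
    else (List.replicate s.1 ' ', true)
  else
    match l with
    | [] => ([], false)                    -- enumerate over an empty line: fall through to `return line, False`
    | c0 :: rest0 =>
      let s := pvCodeSpan (c0 :: rest0)
      match s.2 with
      | some c =>
        if c = ';' then ((c0 :: rest0).take s.1, false)
        else
          let r := pvBGo ((c0 :: rest0).drop (s.1 + 1)) true
          ((c0 :: rest0).take s.1 ++ ' ' :: r.1, r.2)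
      | none => (c0 :: rest0, false)
termination_by l.length
decreasing_by
  · have := pvSpan_pos l hs
    have hl : l ≠ [] := this.2
    have : 0 < l.length := List.length_pos_iff.mpr hl
    simp [List.length_drop]; omega
  · simp [List.length_drop]

def strip_lisp_comments_and_strings_alt (line : String) (in_string : Bool) : String × Bool :=
  let r := pvBGo line.toList in_string
  (String.mk r.1, r.2)

-- ===== PRECONDITION & SPEC =====
def Spec_strip_lisp_comments_and_strings (line : String) (in_string : Bool) (out : String × Bool) : Prop := out = strip_lisp_comments_and_strings_alt line in_string
instance (line : String) (in_string : Bool) (out : String × Bool) : Decidable (Spec_strip_lisp_comments_and_strings line in_string out) := by unfold Spec_strip_lisp_comments_and_strings; infer_instance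

-- ===== CLAIM (what is proved, stated in full; the proofs are below) =====
def Claim_equal_strip_lisp_comments_and_strings : Prop := ∀ (line : String) (in_string : Bool), Dom_strip_lisp_comments_and_strings line in_string → Spec_strip_lisp_comments_and_strings line in_string (strip_lisp_comments_and_strings line in_string)

-- ===== LEMMAS AND PROOFS =====

-- evaluation lemmas for pvSpan (its nested match hides the equations from simp)
theorem pvSpan_quote (rest : List Char) : pvSpan ('"' :: rest) = (1, true) := by
  rw [pvSpan.eq_def]; norm_num; intro h; exact absurd h (by decide)

theorem pvSpan_bs_nil : pvSpan ['\\'] = (1, false) := by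
  rw [pvSpan.eq_def]; norm_num

theorem pvSpan_bs_cons (d : Char) (rest' : List Char) :
    pvSpan ('\\' :: d :: rest') = ((pvSpan rest').1 + 2, (pvSpan rest').2) := by
  rw [pvSpan.eq_def]; norm_num

theorem pvSpan_other (c : Char) (rest : List Char) (hbs : ¬ c = '\\') (hq : ¬ c = '"') :
    pvSpan (c :: rest) = ((pvSpan rest).1 + 1, (pvSpan rest).2) := by
  rw [pvSpan.eq_def]; simp [hbs, hq]

-- A's loop, started in string mode, emits one space per char of the string span and
-- continues in code mode after the closing quote (if any).
theorem pvAGo_string : ∀ (n : Nat) (l : List Char), l.length ≤ n →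
    pvAGo l true false =
      (List.replicate (pvSpan l).1 ' ' ++
        (if (pvSpan l).2 then (pvAGo (l.drop (pvSpan l).1) false false).1 else []),
       if (pvSpan l).2 then (pvAGo (l.drop (pvSpan l).1) false false).2 else true) := by
  intro n
  induction n with
  | zero =>
    intro l hl
    have : l = [] := List.eq_nil_of_length_eq_zero (Nat.le_zero.mp hl)
    subst this; simp [pvAGo, pvSpan]
  | succ n ih =>
    intro l hl
    cases l with
    | nil => simp [pvAGo, pvSpan]
    | cons c rest =>
      by_cases hbs : c = '\\'
      · subst hbs
        cases rest with
        | nil => simp [pvAGo, pvSpan_bs_nil]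
        | cons d rest' =>
          have hlen : rest'.length ≤ n := by simp at hl; omega
          have hA : pvAGo ('\\' :: d :: rest') true false =
              (' ' :: ' ' :: (pvAGo rest' true false).1, (pvAGo rest' true false).2) := by
            simp [pvAGo]
          rw [hA, ih rest' hlen, pvSpan_bs_cons]
          simp [List.replicate_succ]
      · by_cases hq : c = '"'
        · subst hq
          have h1 : ¬(('"' : Char) = '\\') := by decide
          rw [pvSpan_quote]
          simp [pvAGo, h1, List.replicate]
        · have hlen : rest.length ≤ n := by simp at hl; omega
          have hA : pvAGo (c :: rest) true false =
              (' ' :: (pvAGo rest true false).1, (pvAGo rest true false).2) := by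
            simp [pvAGo, hbs, hq]
          rw [hA, ih rest hlen, pvSpan_other c rest hbs hq]
          simp [List.replicate_succ]

-- A's loop, started in code mode, copies the code chunk up to the next ';' or '"',
-- stops at ';', and continues in string mode after '"'.
theorem pvAGo_code : ∀ (l : List Char),
    pvAGo l false false =
      (match (pvCodeSpan l).2 with
       | some c =>
         if c = ';' then (l.take (pvCodeSpan l).1, false)
         else (l.take (pvCodeSpan l).1 ++ ' ' :: (pvAGo (l.drop ((pvCodeSpan l).1 + 1)) true false).1,
               (pvAGo (l.drop ((pvCodeSpan l).1 + 1)) true false).2)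
       | none => (l, false)) := by
  intro l
  induction l with
  | nil => simp [pvAGo, pvCodeSpan]
  | cons c rest ih =>
    by_cases hsc : c = ';'
    · subst hsc; simp [pvAGo, pvCodeSpan]
    · by_cases hq : c = '"'
      · subst hq; simp [pvAGo, pvCodeSpan, hsc]
      · have hA : pvAGo (c :: rest) false false =
            (c :: (pvAGo rest false false).1, (pvAGo rest false false).2) := by
          simp [pvAGo, hsc, hq]
        have hcs : pvCodeSpan (c :: rest) = ((pvCodeSpan rest).1 + 1, (pvCodeSpan rest).2) := by
          simp [pvCodeSpan, hsc, hq]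
        rw [hA, ih, hcs]
        cases hm : (pvCodeSpan rest).2 with
        | none => simp [hm]
        | some d =>
          by_cases hd : d = ';' <;> simp [hm, hd]

-- main equivalence on char lists
theorem pvGo_eq : ∀ (n : Nat) (l : List Char) (ins : Bool), l.length ≤ n →
    pvAGo l ins false = pvBGo l ins := by
  intro n
  induction n with
  | zero =>
    intro l ins hl
    have : l = [] := List.eq_nil_of_length_eq_zero (Nat.le_zero.mp hl)
    subst this
    cases ins <;> simp [pvAGo, pvBGo, pvSpan, pvCodeSpan]
  | succ n ih =>
    intro l ins hl
    cases ins with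
    | true =>
      rw [pvAGo_string (n + 1) l hl, pvBGo.eq_def]
      simp only [if_pos rfl]
      split
      next hs =>
        have hpos := pvSpan_pos l hs
        have hl0 : 0 < l.length := List.length_pos_iff.mpr hpos.2
        have hlen : (l.drop (pvSpan l).1).length ≤ n := by
          simp [List.length_drop]; omega
        rw [ih (l.drop (pvSpan l).1) false hlen]
        simp [hs]
      next hs => simp [hs]
    | false =>
      rw [pvAGo_code l]
      cases l with
      | nil => rw [pvBGo]; simp [pvCodeSpan]
      | cons c0 rest0 =>
        rw [pvBGo.eq_def]
        simp only [Bool.false_eq_true, if_false]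
        cases hm : (pvCodeSpan (c0 :: rest0)).2 with
        | none => simp [hm]
        | some c =>
          have hlen : ((c0 :: rest0).drop ((pvCodeSpan (c0 :: rest0)).1 + 1)).length ≤ n := by
            simp only [List.length_drop, List.length_cons] at hl ⊢
            simp at hl
            omega
          rw [ih _ true hlen]

-- ===== VERDICT (by name: the statement is the Claim_ definition above) =====
theorem strip_lisp_comments_and_strings_spec : Claim_equal_strip_lisp_comments_and_strings := by
  intro line in_string _
  unfold Spec_strip_lisp_comments_and_strings strip_lisp_comments_and_strings strip_lisp_comments_and_strings_alt
  rw [pvGo_eq line.toList.length line.toList in_string le_rfl]
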